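-- pv_equiv track=rewrite | github.com/prash-lb/ISOLA | ISOLA.py | recuper_liste_meilleur_case
-- ===== SOURCE A (Python) =====
-- def recuper_liste_meilleur_case(case_libre, plateau):
--     """
--     recevant une liste des case accesible et renvoyant parmie ces cases accessibles les meilleurs cases permettant
--     le plus de possibilite de deplacement .
--     >>>recuper_liste_meilleur_case([[3, 5], [4, 5], [5, 5], [5, 6]],plateau)
--     [[3, 5], [5, 5]]
--     """
--     lst_case = []
--     lst_possibiliter = []
--     for case in case_libre:
--         lst_prochaine_case_libre = case_alentour_adjacent(case, plateau)
--         nb_possibiliter = len(verification_deplacement_pion(lst_prochaine_case_libre, plateau))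
--         lst_possibiliter.append(nb_possibiliter)
--     max_possibiliter = max(lst_possibiliter)
--     lst_possibiliter_max = [i for i, element in enumerate(lst_possibiliter) if element == max_possibiliter]
--     for i in lst_possibiliter_max:
--         lst_case.append(case_libre[i])
--     return lst_case
--
-- def verification_deplacement_pion(case_libre_joueur,
--                                   plateau):
--     """
--     Vérifie les cases accesible pour le joueur, les case vide.Recois une liste des case autour du joueur et
--     renvoi une liste des case vide
--     >>>verification_deplacement_pion([[3, 4], [3, 5], [3, 6], [4, 4], [4, 6], [5, 4], [5, 5], [5, 6]],plateau)
--     [[3, 5], [3, 6], [4, 4], [4, 6], [5, 4], [5, 5], [5, 6]]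
--     """
--
--     nv_case_libre_joueur = []
--     for case in range(len(case_libre_joueur)):
--         if plateau[(case_libre_joueur[case][1]) - 1][(case_libre_joueur[case][0]) - 1] == 0:
--             nv_case_libre_joueur.append(case_libre_joueur[case])
--     return nv_case_libre_joueur
--
-- def case_alentour_adjacent(joueur, plateau):
--     """
--     cree une liste des case accessibles par le joueur en retirant les cases prise par un joueur ainsi que les cases noirs
--
--     >>>joueur1 = [4,4]
--     >>>plateau = [[0,0,0,0,0,0],[0,0,0,0,0,0],[0,0,0,0,0,0],[0,0,0,0,0,0],[0,0,0,0,0,0],[0,0,0,0,0,0]]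
--     >>>case_alentour_adjacent(joueur1, plateau)
--     case_libre=[[5,4],[3,4],[4,5],[4,3],[5,5],[5,3],[3,5],[3,3]]
--     """
--     case_libre = []
--     pos_x = joueur[0]
--     pos_y = joueur[1]
--     for i in range(pos_x - 1, pos_x + 2):
--         for j in range(pos_y - 1, pos_y + 2):
--             if i < 1 or i > len(plateau[0]) or j < 1 or j > len(plateau) or (i == pos_x and j == pos_y):
--                 continue
--             case_libre.append([i, j])
--
--     return case_libre
-- ===== SOURCE B (Python) =====
-- OFFSETS = [(-1, -1), (-1, 0), (-1, 1), (0, -1), (0, 1), (1, -1), (1, 0), (1, 1)]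
--
--
-- def recuper_liste_meilleur_case(case_libre, plateau):
--     """Single left-to-right pass keeping the best move count seen so far and
--     the list of cases achieving it: reset on a strictly better count, append
--     on a tie.  Counts are taken directly over the eight fixed neighbour
--     offsets; no neighbour list, count list or index pass is ever built."""
--     best = -1
--     best_cases = []
--     for case in case_libre:
--         x, y = case[0], case[1]
--         nb = 0
--         for dx, dy in OFFSETS:
--             i, j = x + dx, y + dy
--             if 1 <= i <= len(plateau[0]) and 1 <= j <= len(plateau) and plateau[j - 1][i - 1] == 0:
--                 nb += 1
--         if nb > best:
--             best = nb
--             best_cases = [case]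
--         elif nb == best:
--             best_cases.append(case)
--     return best_cases
-- ===== Notes on version B (the rewrite author's own statement) =====
-- stated objective: simpler
-- what changed: B replaces A's staged passes (neighbour-list construction, verification filter, parallel count list, max, enumerate-index collection) by ONE online argmax pass that maintains the running best count and the list of cases achieving it (reset on a strictly better count, append on a tie), counting moves directly over eight fixed neighbour offsets so no intermediate list is ever built.
import Mathlib
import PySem

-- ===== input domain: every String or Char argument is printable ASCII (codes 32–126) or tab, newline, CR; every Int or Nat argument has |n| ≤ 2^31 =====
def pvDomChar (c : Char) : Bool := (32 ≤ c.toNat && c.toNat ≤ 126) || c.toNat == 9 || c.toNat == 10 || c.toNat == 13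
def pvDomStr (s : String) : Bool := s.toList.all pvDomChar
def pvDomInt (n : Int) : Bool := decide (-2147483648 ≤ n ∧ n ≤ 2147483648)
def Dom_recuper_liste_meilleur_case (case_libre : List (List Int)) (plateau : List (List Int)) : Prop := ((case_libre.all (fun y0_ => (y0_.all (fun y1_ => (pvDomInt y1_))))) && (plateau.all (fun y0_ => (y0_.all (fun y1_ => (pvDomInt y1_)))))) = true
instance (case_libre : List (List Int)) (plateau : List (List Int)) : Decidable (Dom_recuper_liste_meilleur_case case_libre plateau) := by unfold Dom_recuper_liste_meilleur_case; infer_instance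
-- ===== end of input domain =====

-- B makes a single online argmax pass (running best count, reset on improvement, append on
-- tie), counting moves directly over eight fixed neighbour offsets, instead of A's staged
-- neighbour-list / count-list / max / index-collection passes. Objective: simpler.

-- ===== PORT A =====
def pvCaseAlentour (joueur : List Int) (plateau : List (List Int)) : List (List Int) :=
  let pos_x := PySem.List.pyGetD joueur 0 0
  let pos_y := PySem.List.pyGetD joueur 1 0
  (PySem.List.pyRange (pos_x - 1) (pos_x + 2) 1).foldl (fun acc i =>
    (PySem.List.pyRange (pos_y - 1) (pos_y + 2) 1).foldl (fun acc2 j =>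
      if i < 1 ∨ i > ((PySem.List.pyGetD plateau 0 ([] : List Int)).length : Int) ∨
          j < 1 ∨ j > (plateau.length : Int) ∨ (i = pos_x ∧ j = pos_y) then acc2
      else acc2 ++ [[i, j]]) acc) []

def pvVerification (case_libre_joueur : List (List Int)) (plateau : List (List Int)) : List (List Int) :=
  (PySem.List.pyRange 0 (case_libre_joueur.length : Int) 1).foldl (fun acc k =>
    (fun (cell : List Int) =>
      if PySem.List.pyGetD (PySem.List.pyGetD plateau (PySem.List.pyGetD cell 1 0 - 1) [])
           (PySem.List.pyGetD cell 0 0 - 1) 0 = 0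
      then acc ++ [cell] else acc) (PySem.List.pyGetD case_libre_joueur k [])) []

def recuper_liste_meilleur_case (case_libre : List (List Int)) (plateau : List (List Int)) : List (List Int) :=
  let lst_possibiliter : List Int := case_libre.foldl (fun acc case =>
    acc ++ [((pvVerification (pvCaseAlentour case plateau) plateau).length : Int)]) []
  match PySem.List.max? lst_possibiliter (fun v => v) with
  | none => []  -- Python: max([]) raises ValueError; excluded by Pre_
  | some max_possibiliter =>
    let lst_possibiliter_max : List Int :=
      ((PySem.List.enumerate lst_possibiliter 0).filter (fun p => p.2 == max_possibiliter)).map (·.1)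
    lst_possibiliter_max.foldl (fun acc i => acc ++ [PySem.List.pyGetD case_libre i []]) []

-- ===== PORT B =====
def pvOffsets : List (Int × Int) :=
  [(-1, -1), (-1, 0), (-1, 1), (0, -1), (0, 1), (1, -1), (1, 0), (1, 1)]

def pvNbPossibilites (case : List Int) (plateau : List (List Int)) : Int :=
  let x := PySem.List.pyGetD case 0 0
  let y := PySem.List.pyGetD case 1 0
  pvOffsets.foldl (fun nb d =>
    if 1 ≤ x + d.1 ∧ x + d.1 ≤ ((PySem.List.pyGetD plateau 0 ([] : List Int)).length : Int) ∧
        1 ≤ y + d.2 ∧ y + d.2 ≤ (plateau.length : Int) ∧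
        PySem.List.pyGetD (PySem.List.pyGetD plateau (y + d.2 - 1) []) (x + d.1 - 1) 0 = 0
    then nb + 1 else nb) 0

def recuper_liste_meilleur_case_alt (case_libre : List (List Int)) (plateau : List (List Int)) : List (List Int) :=
  (case_libre.foldl (fun (st : Int × List (List Int)) case =>
      if pvNbPossibilites case plateau > st.1 then (pvNbPossibilites case plateau, [case])
      else if pvNbPossibilites case plateau = st.1 then (st.1, st.2 ++ [case])
      else st)
    (-1, [])).2

-- ===== PRECONDITION & SPEC =====
-- Pre_ excludes exactly the inputs where the Python A raises: an empty case_libre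
-- (max([]) is a ValueError) and any case whose coordinate pair is missing or whose
-- in-bounds neighbourhood reaches past the end of a (ragged) plateau row (IndexError).
def Pre_recuper_liste_meilleur_case (case_libre : List (List Int)) (plateau : List (List Int)) : Prop :=
  case_libre ≠ [] ∧ ∀ c ∈ case_libre,
    2 ≤ c.length ∧
    (0 ≤ PySem.List.pyGetD c 0 0 → plateau ≠ []) ∧
    ∀ i ∈ PySem.List.pyRange (PySem.List.pyGetD c 0 0 - 1) (PySem.List.pyGetD c 0 0 + 2) 1,
      ∀ j ∈ PySem.List.pyRange (PySem.List.pyGetD c 1 0 - 1) (PySem.List.pyGetD c 1 0 + 2) 1,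
        (1 ≤ i ∧ i ≤ ((PySem.List.pyGetD plateau 0 ([] : List Int)).length : Int) ∧
         1 ≤ j ∧ j ≤ (plateau.length : Int) ∧
         ¬(i = PySem.List.pyGetD c 0 0 ∧ j = PySem.List.pyGetD c 1 0)) →
          i ≤ ((PySem.List.pyGetD plateau (j - 1) []).length : Int)
instance (case_libre : List (List Int)) (plateau : List (List Int)) : Decidable (Pre_recuper_liste_meilleur_case case_libre plateau) := by unfold Pre_recuper_liste_meilleur_case; infer_instance

def pvWitness_recuper_liste_meilleur_case : List (List Int) × List (List Int) :=
  ([[1, 1], [2, 2]], [[0, 0], [0, 1]])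

def Spec_recuper_liste_meilleur_case (case_libre : List (List Int)) (plateau : List (List Int)) (out : List (List Int)) : Prop := out = recuper_liste_meilleur_case_alt case_libre plateau
instance (case_libre : List (List Int)) (plateau : List (List Int)) (out : List (List Int)) : Decidable (Spec_recuper_liste_meilleur_case case_libre plateau out) := by unfold Spec_recuper_liste_meilleur_case; infer_instance

-- ===== CLAIM (what is proved, stated in full; the proofs are below) =====
def Claim_equal_recuper_liste_meilleur_case : Prop := ∀ (case_libre : List (List Int)) (plateau : List (List Int)), Dom_recuper_liste_meilleur_case case_libre plateau → Pre_recuper_liste_meilleur_case case_libre plateau → Spec_recuper_liste_meilleur_case case_libre plateau (recuper_liste_meilleur_case case_libre plateau)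
-- ===== LEMMAS AND PROOFS =====

-- A-side proof helper: the same per-case count written as A computes it, over the two ranges.
def pvRangeCount (case : List Int) (plateau : List (List Int)) : Int :=
  let x := PySem.List.pyGetD case 0 0
  let y := PySem.List.pyGetD case 1 0
  (PySem.List.pyRange (x - 1) (x + 2) 1).foldl (fun total i =>
    (PySem.List.pyRange (y - 1) (y + 2) 1).foldl (fun total j =>
      if 1 ≤ i ∧ i ≤ ((PySem.List.pyGetD plateau 0 ([] : List Int)).length : Int) ∧
          1 ≤ j ∧ j ≤ (plateau.length : Int) ∧ ¬(i = x ∧ j = y) ∧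
          PySem.List.pyGetD (PySem.List.pyGetD plateau (j - 1) []) (i - 1) 0 = 0
      then total + 1 else total) total) 0

theorem foldl_flat {α β : Type} (f : List β → α → List β) (F : α → List β) :
    ∀ (l : List α) (acc : List β), (∀ acc2 i, i ∈ l → f acc2 i = acc2 ++ F i) →
      l.foldl f acc = acc ++ l.flatMap F := by
  intro l
  induction l with
  | nil => intro acc _; simp
  | cons a t ih =>
    intro acc h
    simp only [List.foldl_cons, List.flatMap_cons]
    rw [h acc a (by simp), ih (acc ++ F a) (fun acc2 i hi => h acc2 i (by simp [hi])), List.append_assoc]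

theorem cast_sum_map {α : Type} (F : α → Nat) : ∀ (l : List α), ((l.map F).sum : Int) = (l.map (fun i => (F i : Int))).sum := by
  intro l; induction l with
  | nil => simp
  | cons a t ih => simp [ih]

theorem foldl_sum {α : Type} (f : Int → α → Int) (F : α → Int) :
    ∀ (l : List α) (a : Int), (∀ a2 i, i ∈ l → f a2 i = a2 + F i) →
      l.foldl f a = a + (l.map F).sum := by
  intro l
  induction l with
  | nil => intro a _; simp
  | cons x t ih =>
    intro a h
    simp only [List.foldl_cons, List.map_cons, List.sum_cons]
    rw [h a x (by simp), ih (a + F x) (fun a2 i hi => h a2 i (by simp [hi]))]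
    ring

theorem bool_pred_eq (i j x y W H cell : Int) :
    (decide (¬(i < 1 ∨ i > W ∨ j < 1 ∨ j > H ∨ (i = x ∧ j = y))) && decide (cell = 0))
      = decide (1 ≤ i ∧ i ≤ W ∧ 1 ≤ j ∧ j ≤ H ∧ ¬(i = x ∧ j = y) ∧ cell = 0) := by
  apply Bool.eq_iff_iff.mpr
  simp only [Bool.and_eq_true, decide_eq_true_eq, not_or, not_lt, gt_iff_lt]
  tauto

theorem pyGetD_pair0 (i j : Int) : PySem.List.pyGetD [i, j] 0 0 = i := by
  simp [PySem.List.pyGetD, PySem.List.pyGet?, PySem.List.pyIdx?]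

theorem pyGetD_pair1 (i j : Int) : PySem.List.pyGetD [i, j] 1 0 = j := by
  simp [PySem.List.pyGetD, PySem.List.pyGet?, PySem.List.pyIdx?]

theorem pyGetD_append_len {α : Type} (pre : List α) (c : α) (l : List α) (d : α) :
    PySem.List.pyGetD (pre ++ c :: l) (pre.length : Int) d = c := by
  rw [PySem.List.pyGetD_natCast]
  simp

-- A's verification pass is a filter over the candidate list.
theorem verification_eq_filter (L plateau : List (List Int)) :
    pvVerification L plateau = L.filter (fun cell => decide
      (PySem.List.pyGetD (PySem.List.pyGetD plateau (PySem.List.pyGetD cell 1 0 - 1) [])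
        (PySem.List.pyGetD cell 0 0 - 1) 0 = 0)) := by
  unfold pvVerification
  rw [PySem.List.foldl_pyRange_zero_pyGetD' L [] (fun acc cell =>
    if PySem.List.pyGetD (PySem.List.pyGetD plateau (PySem.List.pyGetD cell 1 0 - 1) [])
         (PySem.List.pyGetD cell 0 0 - 1) 0 = 0
    then acc ++ [cell] else acc) []]
  rw [PySem.List.foldl_append_ite_eq_filter]
  simp

-- A's neighbourhood builder as a flatMap of filtered ranges.
theorem caa_eq (c : List Int) (plateau : List (List Int)) :
    pvCaseAlentour c plateau =
      (PySem.List.pyRange (PySem.List.pyGetD c 0 0 - 1) (PySem.List.pyGetD c 0 0 + 2) 1).flatMap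
        (fun i =>
          ((PySem.List.pyRange (PySem.List.pyGetD c 1 0 - 1) (PySem.List.pyGetD c 1 0 + 2) 1).filter
            (fun j => decide (¬(i < 1 ∨ i > ((PySem.List.pyGetD plateau 0 ([] : List Int)).length : Int) ∨
              j < 1 ∨ j > (plateau.length : Int) ∨ (i = PySem.List.pyGetD c 0 0 ∧ j = PySem.List.pyGetD c 1 0))))).map
            (fun j => [i, j])) := by
  simp only [pvCaseAlentour]
  have h1 : ∀ (acc : List (List Int)) (i : Int), i ∈ PySem.List.pyRange (PySem.List.pyGetD c 0 0 - 1) (PySem.List.pyGetD c 0 0 + 2) 1 →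
      (PySem.List.pyRange (PySem.List.pyGetD c 1 0 - 1) (PySem.List.pyGetD c 1 0 + 2) 1).foldl (fun acc2 j =>
        if i < 1 ∨ i > ((PySem.List.pyGetD plateau 0 ([] : List Int)).length : Int) ∨
            j < 1 ∨ j > (plateau.length : Int) ∨ (i = PySem.List.pyGetD c 0 0 ∧ j = PySem.List.pyGetD c 1 0) then acc2
        else acc2 ++ [[i, j]]) acc
      = acc ++ ((PySem.List.pyRange (PySem.List.pyGetD c 1 0 - 1) (PySem.List.pyGetD c 1 0 + 2) 1).filter
            (fun j => decide (¬(i < 1 ∨ i > ((PySem.List.pyGetD plateau 0 ([] : List Int)).length : Int) ∨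
              j < 1 ∨ j > (plateau.length : Int) ∨ (i = PySem.List.pyGetD c 0 0 ∧ j = PySem.List.pyGetD c 1 0))))).map
            (fun j => [i, j]) := by
    intro acc i _
    rw [show (fun (acc2 : List (List Int)) (j : Int) =>
        if i < 1 ∨ i > ((PySem.List.pyGetD plateau 0 ([] : List Int)).length : Int) ∨
            j < 1 ∨ j > (plateau.length : Int) ∨ (i = PySem.List.pyGetD c 0 0 ∧ j = PySem.List.pyGetD c 1 0) then acc2
        else acc2 ++ [[i, j]])
      = (fun acc2 j =>
        if ¬(i < 1 ∨ i > ((PySem.List.pyGetD plateau 0 ([] : List Int)).length : Int) ∨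
            j < 1 ∨ j > (plateau.length : Int) ∨ (i = PySem.List.pyGetD c 0 0 ∧ j = PySem.List.pyGetD c 1 0)) then acc2 ++ [[i, j]]
        else acc2) from by funext acc2 j; rw [ite_not]]
    exact PySem.List.foldl_append_ite _ _ _ _
  exact foldl_flat _ _ _ [] h1

-- A's count per case equals the range-based count.
theorem nb_eq (c : List Int) (plateau : List (List Int)) :
    ((pvVerification (pvCaseAlentour c plateau) plateau).length : Int) = pvRangeCount c plateau := by
  rw [verification_eq_filter, caa_eq]
  simp only [pvRangeCount]
  rw [foldl_sum _ (fun i => ((PySem.List.pyRange (PySem.List.pyGetD c 1 0 - 1) (PySem.List.pyGetD c 1 0 + 2) 1).countP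
      (fun j => decide (1 ≤ i ∧ i ≤ ((PySem.List.pyGetD plateau 0 ([] : List Int)).length : Int) ∧
          1 ≤ j ∧ j ≤ (plateau.length : Int) ∧ ¬(i = PySem.List.pyGetD c 0 0 ∧ j = PySem.List.pyGetD c 1 0) ∧
          PySem.List.pyGetD (PySem.List.pyGetD plateau (j - 1) []) (i - 1) 0 = 0)) : Int))
    _ _ (fun a2 i _ => PySem.List.foldl_ite_add_one _ _ _)]
  rw [List.filter_flatMap, List.length_flatMap, cast_sum_map, zero_add]
  congr 1
  apply List.map_congr_left
  intro i _
  congr 1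
  rw [List.filter_map, List.length_map, ← List.countP_eq_length_filter, List.countP_filter]
  apply List.countP_congr
  intro j _
  simp only [Function.comp_apply, pyGetD_pair0, pyGetD_pair1, Bool.and_comm]
  rw [bool_pred_eq]

-- expanding the two 3-element ranges
theorem range3 (a : Int) : PySem.List.pyRange (a - 1) (a + 2) 1 = [a + -1, a, a + 1] := by
  rw [PySem.List.pyRange_one_cons (by omega),
      show a - 1 + 1 = a from by ring,
      PySem.List.pyRange_one_cons (by omega),
      PySem.List.pyRange_one_cons (by omega),
      PySem.List.pyRange_one_eq_nil (by omega),
      show a - 1 = a + -1 from by ring]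

theorem ite_incr (P : Prop) [Decidable P] (n : Int) :
    (if P then n + 1 else n) = n + (if P then 1 else 0) := by
  split <;> simp

-- the range-based count equals B's offset-based count
theorem rangeCount_eq_offsets (c : List Int) (plateau : List (List Int)) :
    pvRangeCount c plateau = pvNbPossibilites c plateau := by
  have hxm : (PySem.List.pyGetD c 0 0 + -1 = PySem.List.pyGetD c 0 0) = False := eq_false (by omega)
  have hxp : (PySem.List.pyGetD c 0 0 + 1 = PySem.List.pyGetD c 0 0) = False := eq_false (by omega)
  have hym : (PySem.List.pyGetD c 1 0 + -1 = PySem.List.pyGetD c 1 0) = False := eq_false (by omega)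
  have hyp : (PySem.List.pyGetD c 1 0 + 1 = PySem.List.pyGetD c 1 0) = False := eq_false (by omega)
  simp only [pvRangeCount, pvNbPossibilites, pvOffsets, range3,
    List.foldl_cons, List.foldl_nil, ite_incr]
  simp only [hxm, hxp, hym, hyp, false_and, and_false, true_and, and_true, not_true,
    not_false_eq_true, if_false, add_zero, zero_add]

-- Selecting by the indices of maximal entries is filtering the list itself.
theorem enum_sel (g : List Int → Int) (m : Int) :
    ∀ (l pre : List (List Int)),
      ((((PySem.List.enumerate (l.map g) (pre.length : Int)).filter (fun p => p.2 == m)).map (·.1)).map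
        (fun i => PySem.List.pyGetD (pre ++ l) i [])) = l.filter (fun c => g c == m) := by
  intro l
  induction l with
  | nil => intro pre; simp [PySem.List.enumerate_nil]
  | cons c t ih =>
    intro pre
    rw [List.map_cons, PySem.List.enumerate_cons]
    have hlen : (pre.length : Int) + 1 = (((pre ++ [c]).length : Nat) : Int) := by simp
    have happ : pre ++ c :: t = (pre ++ [c]) ++ t := by simp
    by_cases h : g c == m
    · rw [List.filter_cons_of_pos (by simpa using h)]
      rw [List.map_cons, List.map_cons, List.filter_cons_of_pos (by simpa using h)]
      rw [pyGetD_append_len]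
      congr 1
      rw [hlen, happ]
      exact ih (pre ++ [c])
    · rw [List.filter_cons_of_neg (by simpa using h)]
      rw [List.filter_cons_of_neg (by simpa using h)]
      rw [hlen, happ]
      exact ih (pre ++ [c])

-- B's single pass with reset-on-improvement, characterised in closed form.
theorem foldl_reset {α : Type} (f : α → Int) :
    ∀ (l : List α) (b : Int) (acc : List α),
      l.foldl (fun st c =>
          if f c > st.1 then (f c, [c])
          else if f c = st.1 then (st.1, st.2 ++ [c])
          else st) (b, acc)
      = ((l.map f).foldl max b,
         (if (l.map f).foldl max b = b then acc else []) ++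
           l.filter (fun c => f c == (l.map f).foldl max b)) := by
  intro l
  induction l with
  | nil => intro b acc; simp
  | cons c t ih =>
    intro b acc
    have hle : ∀ (b' : Int), b' ≤ (t.map f).foldl max b' := fun b' => (PySem.List.le_foldl_max (t.map f) b').1
    simp only [List.foldl_cons, List.map_cons, List.filter_cons]
    by_cases h1 : f c > b
    · rw [if_pos h1, ih (f c) [c]]
      have hm : max b (f c) = f c := by omega
      simp only [hm]
      have hne : ¬ (t.map f).foldl max (f c) = b := by have := hle (f c); omega
      rw [if_neg hne]
      by_cases h2 : f c = (t.map f).foldl max (f c)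
      · rw [← h2]
        simp
      · have h2' : ¬ (t.map f).foldl max (f c) = f c := fun h => h2 h.symm
        simp [h2, h2']
    · rw [if_neg h1]
      have hm : max b (f c) = b := by omega
      by_cases h2 : f c = b
      · rw [if_pos h2, ih b (acc ++ [c])]
        simp only [hm]
        by_cases h3 : (t.map f).foldl max b = b
        · simp [h3, h2]
        · simp [h3, show ¬ f c = (t.map f).foldl max b from by omega]
      · rw [if_neg h2, ih b acc]
        simp only [hm]
        have : ¬ f c = (t.map f).foldl max b := by have := hle b; omega
        simp [this]

theorem nb_nonneg (c : List Int) (plateau : List (List Int)) : 0 ≤ pvNbPossibilites c plateau := by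
  simp only [pvNbPossibilites]
  rw [PySem.List.foldl_ite_add_one]
  positivity

theorem main_eq (case_libre plateau : List (List Int)) :
    recuper_liste_meilleur_case case_libre plateau = recuper_liste_meilleur_case_alt case_libre plateau := by
  simp only [recuper_liste_meilleur_case, recuper_liste_meilleur_case_alt]
  rw [PySem.List.foldl_append_singleton_eq_map, List.nil_append]
  have hmap : case_libre.map (fun case => ((pvVerification (pvCaseAlentour case plateau) plateau).length : Int))
      = case_libre.map (fun case => pvNbPossibilites case plateau) :=
    List.map_congr_left (fun c _ => by rw [nb_eq, rangeCount_eq_offsets])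
  rw [hmap, foldl_reset (fun case => pvNbPossibilites case plateau) case_libre (-1) []]
  cases case_libre with
  | nil => simp [PySem.List.max?]
  | cons c t =>
    rw [List.map_cons, PySem.List.max?_id_cons]
    have hm : max (-1) (pvNbPossibilites c plateau) = pvNbPossibilites c plateau := by
      have := nb_nonneg c plateau; omega
    simp only [List.foldl_cons, hm]
    rw [PySem.List.foldl_append_singleton_eq_map, List.nil_append]
    have hsel := enum_sel (fun case => pvNbPossibilites case plateau)
      ((t.map (fun case => pvNbPossibilites case plateau)).foldl max (pvNbPossibilites c plateau)) (c :: t) []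
    simp only [List.length_nil, Nat.cast_zero, List.nil_append] at hsel
    rw [List.map_cons] at hsel
    rw [hsel]
    split <;> simp [List.filter_cons]

-- ===== VERDICT (by name: the statement is the Claim_ definition above) =====
theorem recuper_liste_meilleur_case_spec : Claim_equal_recuper_liste_meilleur_case := by
  intro case_libre plateau _ _
  exact main_eq case_libre plateau
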